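-- pv_equiv track=rewrite | github.com/flokrieger/OpenNTT | tool/ntt_hw_model.py | rom_content_DIF_NR
-- ===== SOURCE A (Python) =====
-- def rom_content_DIF_NR(N,nr_pu,modmul_lat,omega,q):
--   initial_fill = [[0]*modmul_lat for _ in range(nr_pu)]
--
--   for i in range(modmul_lat):
--       for j in range(nr_pu):
--           if nr_pu == 1:
--             initial_fill[j][i] = omega**((i>>1) + (i & 1)*N//4) % q
--           else:
--             initial_fill[j][i] = omega**(i+j*(N//2//nr_pu)) % q
--
--   omega_c_init = (omega**modmul_lat) % q if nr_pu > 1 else (omega**(modmul_lat//2)) % q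
--   return initial_fill, omega_c_init
-- ===== SOURCE B (Python) =====
-- def rom_content_DIF_NR(N, nr_pu, modmul_lat, omega, q):
--     if nr_pu == 1:
--         rows = [[pow(omega, (i >> 1) + (i & 1) * N // 4, q) for i in range(modmul_lat)]]
--     else:
--         rows = []
--         for j in range(nr_pu):
--             row = []
--             x = pow(omega, j * (N // 2 // nr_pu), q)
--             for _ in range(modmul_lat):
--                 row.append(x)
--                 x = x * omega % q
--             rows.append(row)
--     c = pow(omega, modmul_lat if nr_pu > 1 else modmul_lat // 2, q)
--     return rows, c
-- ===== Notes on version B (the rewrite author's own statement) =====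
-- stated objective: faster
-- what changed: A computes each ROM cell with full-size bignum exponentiation omega**e % q; B uses modular exponentiation pow(omega, e, q) and, per processing-unit row, an incremental running product x = x*omega % q, so all intermediate numbers stay bounded by q.
-- outside the precondition, e.g. on rom_content_DIF_NR(-4, 1, 1, 2, 5): A returns ([[1]], 1), B returns ([[1]], 1); on rom_content_DIF_NR(4, 2, -2, 2, 5): A returns ([[], []], 0.25), B returns ([[], []], 4)
import Mathlib
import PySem

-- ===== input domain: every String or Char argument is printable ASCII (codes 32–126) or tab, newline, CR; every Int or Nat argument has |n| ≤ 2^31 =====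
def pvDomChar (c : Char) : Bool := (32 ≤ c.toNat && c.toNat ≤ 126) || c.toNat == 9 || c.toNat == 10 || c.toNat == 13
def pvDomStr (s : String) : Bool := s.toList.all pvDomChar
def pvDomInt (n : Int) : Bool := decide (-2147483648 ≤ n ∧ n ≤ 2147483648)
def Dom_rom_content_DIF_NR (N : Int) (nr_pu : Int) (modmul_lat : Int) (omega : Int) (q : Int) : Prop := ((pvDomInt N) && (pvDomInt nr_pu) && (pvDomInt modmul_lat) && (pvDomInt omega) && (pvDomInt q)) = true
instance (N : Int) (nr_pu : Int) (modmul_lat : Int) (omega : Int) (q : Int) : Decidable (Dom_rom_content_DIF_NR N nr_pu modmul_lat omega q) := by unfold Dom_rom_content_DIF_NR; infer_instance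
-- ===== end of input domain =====

-- B replaces A's per-cell bignum exponentiation omega**e % q by modular exponentiation and an
-- incremental running product per row (objective: faster; measured).


-- ===== PORT A =====
-- literal port of A: build the zero matrix, then the two nested for-loops assign each cell
-- initial_fill[j][i] = omega**e % q.  'omega**e % q' is ported as 'PySem.Int.mod (omega ^ e.toNat) q',
-- exact whenever e ≥ 0 (Pre_ guarantees this; for e < 0 Python produces a float, excluded below).
def rom_content_DIF_NR (N : Int) (nr_pu : Int) (modmul_lat : Int) (omega : Int) (q : Int) : List (List Int) × Int :=
  let initial_fill : List (List Int) :=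
    List.replicate nr_pu.toNat (List.replicate modmul_lat.toNat (0 : Int))
  let filled : List (List Int) :=
    (PySem.List.pyRange 0 modmul_lat 1).foldl (fun M (i : Int) =>
      (PySem.List.pyRange 0 nr_pu 1).foldl (fun M (j : Int) =>
        let v : Int :=
          if nr_pu = 1 then
            PySem.Int.mod (omega ^ ((i >>> (1 : Nat)) + PySem.Int.floordiv (PySem.Int.band i 1 * N) 4).toNat) q
          else
            PySem.Int.mod (omega ^ ((i + j * PySem.Int.floordiv (PySem.Int.floordiv N 2) nr_pu).toNat)) q
        M.set j.toNat ((M.getD j.toNat []).set i.toNat v)) M) initial_fill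
  let omega_c_init : Int :=
    if nr_pu > 1 then PySem.Int.mod (omega ^ modmul_lat.toNat) q
    else PySem.Int.mod (omega ^ (PySem.Int.floordiv modmul_lat 2).toNat) q
  (filled, omega_c_init)

-- ===== PORT B =====
-- the inner 'for _ in range(m): row.append(x); x = x*omega % q' loop of Source B
def pvAltRow (omega q : Int) : Nat → Int → List Int
  | 0, _ => []
  | Nat.succ k, x => x :: pvAltRow omega q k (PySem.Int.mod (x * omega) q)

def rom_content_DIF_NR_alt (N : Int) (nr_pu : Int) (modmul_lat : Int) (omega : Int) (q : Int) : List (List Int) × Int :=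
  let rows : List (List Int) :=
    if nr_pu = 1 then
      [(PySem.List.pyRange 0 modmul_lat 1).map (fun (i : Int) =>
        PySem.Int.powMod omega ((i >>> (1 : Nat)) + PySem.Int.floordiv (PySem.Int.band i 1 * N) 4).toNat q)]
    else
      (PySem.List.pyRange 0 nr_pu 1).map (fun (j : Int) =>
        pvAltRow omega q modmul_lat.toNat
          (PySem.Int.powMod omega (j * PySem.Int.floordiv (PySem.Int.floordiv N 2) nr_pu).toNat q))
  let c : Int :=
    PySem.Int.powMod omega (if nr_pu > 1 then modmul_lat.toNat else (PySem.Int.floordiv modmul_lat 2).toNat) q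
  (rows, c)

-- ===== PRECONDITION & SPEC =====
-- Pre_ excludes q = 0 (A raises ZeroDivisionError) and negative N or modmul_lat, where A's
-- 'omega**e' gets a negative exponent and returns floats instead of ints; on the few degenerate
-- excluded inputs where every exercised exponent is still ≥ 0 A returns ints (see claim cites).
def Pre_rom_content_DIF_NR (N : Int) (nr_pu : Int) (modmul_lat : Int) (omega : Int) (q : Int) : Prop :=
  q ≠ 0 ∧ 0 ≤ N ∧ 0 ≤ modmul_lat
instance (N : Int) (nr_pu : Int) (modmul_lat : Int) (omega : Int) (q : Int) : Decidable (Pre_rom_content_DIF_NR N nr_pu modmul_lat omega q) := by unfold Pre_rom_content_DIF_NR; infer_instance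

def pvWitness_rom_content_DIF_NR : Int × Int × Int × Int × Int := (8, 2, 4, 3, 17)

def Spec_rom_content_DIF_NR (N : Int) (nr_pu : Int) (modmul_lat : Int) (omega : Int) (q : Int) (out : List (List Int) × Int) : Prop := out = rom_content_DIF_NR_alt N nr_pu modmul_lat omega q
instance (N : Int) (nr_pu : Int) (modmul_lat : Int) (omega : Int) (q : Int) (out : List (List Int) × Int) : Decidable (Spec_rom_content_DIF_NR N nr_pu modmul_lat omega q out) := by unfold Spec_rom_content_DIF_NR; infer_instance

-- ===== CLAIM (what is proved, stated in full; the proofs are below) =====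
def Claim_equal_rom_content_DIF_NR : Prop := ∀ (N : Int) (nr_pu : Int) (modmul_lat : Int) (omega : Int) (q : Int), Dom_rom_content_DIF_NR N nr_pu modmul_lat omega q → Pre_rom_content_DIF_NR N nr_pu modmul_lat omega q → Spec_rom_content_DIF_NR N nr_pu modmul_lat omega q (rom_content_DIF_NR N nr_pu modmul_lat omega q)

-- ===== LEMMAS AND PROOFS =====

-- Int.fmod is a function of the emod residue, so congruent arguments give equal fmods
theorem pv_fmod_congr (x y q : Int) (h : x % q = y % q) : x.fmod q = y.fmod q := by
  have hd : (q ∣ x) ↔ (q ∣ y) := by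
    rw [Int.dvd_iff_emod_eq_zero, Int.dvd_iff_emod_eq_zero, h]
  rw [Int.fmod_eq_emod, Int.fmod_eq_emod, h]
  by_cases h0 : 0 ≤ q
  · simp [h0]
  · simp [h0, hd]

theorem pv_fmod_emod (a q : Int) : a.fmod q % q = a % q := by
  rw [Int.fmod_eq_emod]; split <;> simp

theorem pv_mulstep (a b q : Int) : (a.fmod q * b).fmod q = (a * b).fmod q := by
  apply pv_fmod_congr
  rw [Int.mul_emod, pv_fmod_emod, ← Int.mul_emod]

-- the running product of B computes exactly the table of modular powers
theorem pvAltRow_eq (omega q : Int) (m b : Nat) :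
    pvAltRow omega q m (PySem.Int.powMod omega b q)
      = (List.range m).map (fun i => PySem.Int.mod (omega ^ (b + i)) q) := by
  induction m generalizing b with
  | zero => simp [pvAltRow]
  | succ m ih =>
    have hx : PySem.Int.mod (PySem.Int.powMod omega b q * omega) q
        = PySem.Int.powMod omega (b + 1) q := by
      simp only [PySem.Int.powMod, PySem.Int.mod, pv_mulstep, pow_succ]
    rw [pvAltRow, hx, ih (b + 1), List.range_succ_eq_map]
    simp only [List.map_cons, List.map_map, PySem.Int.powMod, Nat.add_zero]
    refine congrArg₂ _ rfl (List.map_congr_left fun i _ => ?_)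
    simp [Function.comp, Nat.add_comm, Nat.add_left_comm]

-- setting one position of a map-over-range
theorem pv_set_map_range {α : Type} (F : Nat → α) (v : α) (n k : Nat) :
    ((List.range n).map F).set k v
      = (List.range n).map (fun j => if j = k then v else F j) := by
  apply List.ext_getElem (by simp)
  intro j h1 h2
  simp only [List.getElem_set, List.getElem_map, List.getElem_range]
  split
  · simp_all
  · simp_all
    intro h
    exact absurd h.symm (by assumption)

-- the inner j-loop of A sets column i of every row
theorem pv_fold_col (g : Nat → Int) (i : Nat) (h : Nat → List Int) (n : Nat) :
    ∀ k, k ≤ n →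
      (List.range k).foldl (fun M j => M.set j ((M.getD j []).set i (g j))) ((List.range n).map h)
        = (List.range n).map (fun j => if j < k then (h j).set i (g j) else h j) := by
  intro k
  induction k with
  | zero => intro _; simp
  | succ k ih =>
    intro hk
    rw [List.range_succ, List.foldl_append, ih (by omega), List.foldl_cons, List.foldl_nil]
    have hget : (((List.range n).map fun j => if j < k then (h j).set i (g j) else h j).getD k [])
        = h k := by
      rw [List.getD_eq_getElem?_getD]
      simp only [List.getElem?_map]
      rw [List.getElem?_range (by omega)]
      simp
    rw [hget, pv_set_map_range]
    refine List.map_congr_left fun j hj => ?_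
    rw [List.mem_range] at hj
    by_cases h1 : j = k <;> by_cases h2 : j < k <;> simp [h1, h2] <;> omega

theorem pv_set_append_replicate (L : List Int) (r : Nat) (hr : 0 < r) (v : Int) :
    (L ++ List.replicate r 0).set L.length v = L ++ v :: List.replicate (r - 1) 0 := by
  obtain ⟨r', rfl⟩ : ∃ r', r = r' + 1 := ⟨r - 1, by omega⟩
  rw [List.replicate_succ, List.set_append_right _ _ le_rfl]
  simp

-- the full double loop of A builds the matrix of cell values f i j
theorem pv_fold_mat (f : Nat → Nat → Int) (n m : Nat) :
    ∀ k, k ≤ m →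
      (List.range k).foldl (fun M i =>
          (List.range n).foldl (fun M j => M.set j ((M.getD j []).set i (f i j))) M)
        (List.replicate n (List.replicate m (0 : Int)))
      = (List.range n).map (fun j => (List.range k).map (fun i => f i j) ++ List.replicate (m - k) 0) := by
  intro k
  induction k with
  | zero =>
    intro _
    rw [List.range_zero, List.foldl_nil]
    rw [show ((fun (j : Nat) => List.map (fun i => f i j) [] ++ List.replicate (m - 0) (0 : Int)))
        = (fun _ => List.replicate m (0 : Int)) from by funext j; simp]
    rw [List.map_const', List.length_range]
  | succ k ih =>
    intro hk
    rw [List.range_succ, List.foldl_append, ih (by omega), List.foldl_cons, List.foldl_nil]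
    rw [pv_fold_col (fun j => f k j) k _ n n le_rfl]
    refine List.map_congr_left fun j hj => ?_
    rw [List.mem_range] at hj
    simp only [hj, if_pos]
    have hset := pv_set_append_replicate ((List.range k).map (fun i => f i j)) (m - k) (by omega) (f k j)
    simp only [List.length_map, List.length_range] at hset
    rw [hset]
    simp [Nat.sub_sub]

theorem pv_floordiv_nonneg (a b : Int) (ha : 0 ≤ a) (hb : 0 < b) : 0 ≤ PySem.Int.floordiv a b := by
  rw [PySem.Int.floordiv_eq_ediv_of_pos hb]
  exact Int.ediv_nonneg ha (le_of_lt hb)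

-- ===== VERDICT (by name: the statement is the Claim_ definition above) =====
theorem rom_content_DIF_NR_spec : Claim_equal_rom_content_DIF_NR := by
  intro N nr_pu modmul_lat omega q _ hpre
  obtain ⟨hq, hN, hml⟩ := hpre
  unfold Spec_rom_content_DIF_NR rom_content_DIF_NR rom_content_DIF_NR_alt
  obtain ⟨m, hm⟩ : ∃ m : Nat, modmul_lat = (m : Int) := ⟨modmul_lat.toNat, (Int.toNat_of_nonneg hml).symm⟩
  subst hm
  -- second components agree in every case
  refine Prod.ext ?_ (by by_cases h : nr_pu > 1 <;> simp [h, PySem.Int.powMod])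
  simp only
  rcases lt_or_ge nr_pu 1 with hlt | hge
  · -- nr_pu ≤ 0 : no rows on either side
    have hne : ¬ (nr_pu = 1) := by omega
    have hr : PySem.List.pyRange 0 nr_pu 1 = [] := by
      rw [PySem.List.pyRange_one, show (nr_pu - 0).toNat = 0 from by omega]
      simp
    have h0 : nr_pu.toNat = 0 := by omega
    simp only [hne, if_false, hr, h0, List.replicate_zero, List.map_nil, List.foldl_nil]
    exact List.foldl_fixed _
  · -- nr_pu ≥ 1 : the double loop fills the n × m matrix of cell values
    obtain ⟨n, hn⟩ : ∃ n : Nat, nr_pu = (n : Int) := ⟨nr_pu.toNat, (Int.toNat_of_nonneg (by omega)).symm⟩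
    subst hn
    simp only [PySem.List.pyRange_zero_natCast, List.foldl_map, List.map_map, Int.toNat_natCast]
    rw [pv_fold_mat (fun i j =>
        if ((n : Nat) : Int) = 1 then
          PySem.Int.mod (omega ^ ((((i : Nat) : Int)) >>> (1 : Nat) + PySem.Int.floordiv (PySem.Int.band ((i : Nat) : Int) 1 * N) 4).toNat) q
        else
          PySem.Int.mod (omega ^ ((((i : Nat) : Int)) + ((j : Nat) : Int) * PySem.Int.floordiv (PySem.Int.floordiv N 2) ((n : Nat) : Int)).toNat) q)
      n m m le_rfl]
    simp only [Nat.sub_self, List.replicate_zero, List.append_nil]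
    by_cases hn1 : ((n : Nat) : Int) = 1
    · have : n = 1 := by exact_mod_cast hn1
      subst this
      simp only [hn1, if_pos, List.range_one, List.map_cons, List.map_nil, Function.comp_def,
        PySem.Int.powMod]
    · have hn2 : 2 ≤ n := by omega
      simp only [hn1, if_false, Function.comp_def]
      have hs0 : 0 ≤ PySem.Int.floordiv (PySem.Int.floordiv N 2) ((n : Nat) : Int) :=
        pv_floordiv_nonneg _ _ (pv_floordiv_nonneg N 2 hN (by norm_num)) (by exact_mod_cast hn2.trans_lt' (by norm_num))
      refine List.map_congr_left fun j hj => ?_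
      rw [pvAltRow_eq]
      refine (List.map_congr_left fun i _ => ?_).symm
      have hjs : 0 ≤ ((j : Nat) : Int) * PySem.Int.floordiv (PySem.Int.floordiv N 2) ((n : Nat) : Int) :=
        mul_nonneg (Int.natCast_nonneg j) hs0
      rw [show ((((j : Nat) : Int) * PySem.Int.floordiv (PySem.Int.floordiv N 2) ((n : Nat) : Int)).toNat + i)
          = ((((i : Nat) : Int)) + ((j : Nat) : Int) * PySem.Int.floordiv (PySem.Int.floordiv N 2) ((n : Nat) : Int)).toNat from by omega]
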